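-- pv_equiv track=rewrite | github.com/YoloWingPixie/dcs-world-schema | tools/validate_types.py | split_union
-- ===== SOURCE A (Python) =====
-- from typing import Any, Dict, List, Set
--
-- def split_union(t: str) -> List[str]:
--     out: List[str] = []
--     for part in t.split("|"):
--         token = part.strip()
--         if token.endswith("[]"):
--             token = token[:-2].strip()
--         if token.startswith("map<") and token.endswith(">"):
--             out.extend(split_union(token[4:-1].strip()))
--         elif token:
--             out.append(token)
--     return out
-- ===== SOURCE B (Python) =====
-- def split_union(t: str):
--     out = []
--     for part in t.split("|"):
--         token = part.strip()
--         while True: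
--             if token.endswith("[]"):
--                 token = token[:-2].strip()
--             if token.startswith("map<") and token.endswith(">"):
--                 token = token[4:-1].strip()
--                 continue
--             break
--         if token:
--             out.append(token)
--     return out
-- ===== Notes on version B (the rewrite author's own statement) =====
-- stated objective: simpler
-- what changed: Replaces A's recursive descent (each map-wrapper payload is fed back through split_union and re-split on the union separator) with a flat iterative while-loop that unwraps the trailing-array and map-wrapper layers of each token in place; no recursion and no re-splitting.
import Mathlib
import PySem

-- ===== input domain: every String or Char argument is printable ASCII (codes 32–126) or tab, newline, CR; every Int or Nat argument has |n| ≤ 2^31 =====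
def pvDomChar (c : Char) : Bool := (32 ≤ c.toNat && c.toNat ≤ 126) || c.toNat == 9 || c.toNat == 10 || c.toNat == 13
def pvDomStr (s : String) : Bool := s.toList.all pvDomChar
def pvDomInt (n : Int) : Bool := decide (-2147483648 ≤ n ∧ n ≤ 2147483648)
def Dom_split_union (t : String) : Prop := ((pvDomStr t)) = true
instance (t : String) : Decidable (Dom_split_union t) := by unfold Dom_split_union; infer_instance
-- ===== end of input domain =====

-- B replaces A's recursive descent into map-wrapper payloads with an iterative per-token unwrap loop
-- (objective: simpler — no recursion, one flat pass); same return value on every input.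

-- shared token-level helpers (both Pythons contain these exact expressions)
-- token = token[:-2].strip() if token.endswith("[]") else token
def pvStripBrack (tok : List Char) : List Char :=
  if PySem.Chars.endswith tok ['[', ']'] then
    PySem.Chars.strip (PySem.Chars.slice tok none (some (-2)))
  else tok

-- token.startswith("map<") and token.endswith(">")
def pvMapCond (tok : List Char) : Bool :=
  PySem.Chars.startswith tok ['m', 'a', 'p', '<'] && PySem.Chars.endswith tok ['>']

-- token[4:-1].strip()
def pvInner (tok : List Char) : List Char :=
  PySem.Chars.strip (PySem.Chars.slice tok (some 4) (some (-1)))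

-- ===== PORT A =====
-- A's recursion, fueled (fuel = length + 1 always suffices: the recursive argument is ≥ 5 shorter)
def pvGoA : Nat → List Char → List (List Char)
  | 0, _ => []
  | f + 1, cs =>
    ((PySem.Chars.split? cs ['|']).getD []).foldl (fun out part =>
      if pvMapCond (pvStripBrack (PySem.Chars.strip part)) then
        out ++ pvGoA f (pvInner (pvStripBrack (PySem.Chars.strip part)))
      else if (pvStripBrack (PySem.Chars.strip part)).isEmpty then out
      else out ++ [pvStripBrack (PySem.Chars.strip part)]) []

def split_union (t : String) : List String :=
  (pvGoA (t.toList.length + 1) t.toList).map String.ofList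

-- ===== PORT B =====
-- the `while True` unwrap loop of Source B, fueled (fuel = token length + 1 always suffices)
def pvUnwrapB : Nat → List Char → List Char
  | 0, tok => tok
  | f + 1, tok =>
    if pvMapCond (pvStripBrack tok) then pvUnwrapB f (pvInner (pvStripBrack tok))
    else pvStripBrack tok

-- loop body of Source B's single `for part in t.split("|")` pass
def pvBodyB (out : List (List Char)) (part : List Char) : List (List Char) :=
  if (pvUnwrapB (part.length + 1) (PySem.Chars.strip part)).isEmpty then out
  else out ++ [pvUnwrapB (part.length + 1) (PySem.Chars.strip part)]

def split_union_alt (t : String) : List String :=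
  (((PySem.Chars.split? t.toList ['|']).getD []).foldl pvBodyB []).map String.ofList

-- ===== PRECONDITION & SPEC =====
def Spec_split_union (t : String) (out : List String) : Prop := out = split_union_alt t
instance (t : String) (out : List String) : Decidable (Spec_split_union t out) := by unfold Spec_split_union; infer_instance

-- ===== CLAIM (what is proved, stated in full; the proofs are below) =====
def Claim_equal_split_union : Prop := ∀ (t : String), Dom_split_union t → Spec_split_union t (split_union t)

-- ===== LEMMAS AND PROOFS =====

-- accumulator-passing model of PySem.Chars.splitOn for a single-character separator
def pvSplit (c : Char) : List Char → List Char → List (List Char)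
  | [], cur => [cur.reverse]
  | x :: rest, cur =>
    if c = x then cur.reverse :: pvSplit c rest [] else pvSplit c rest (x :: cur)

lemma pvSplit_go_spec (c : Char) :
    ∀ (fuel : Nat) (l cur : List Char) (acc : List (List Char)), l.length < fuel →
      PySem.Chars.splitOn.go [c] fuel l cur acc = acc.reverse ++ pvSplit c l cur := by
  intro fuel
  induction fuel with
  | zero => intro l cur acc h; omega
  | succ f ih =>
    intro l cur acc h
    cases l with
    | nil => simp [PySem.Chars.splitOn.go, pvSplit]
    | cons x rest =>
      by_cases hcx : c = x
      · subst hcx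
        have hstep : PySem.Chars.splitOn.go [c] (f + 1) (c :: rest) cur acc
            = PySem.Chars.splitOn.go [c] f rest [] (cur.reverse :: acc) := by
          simp [PySem.Chars.splitOn.go, List.isPrefixOf]
        rw [hstep, ih rest [] _ (by simp at h; omega)]
        simp [pvSplit]
      · have hstep : PySem.Chars.splitOn.go [c] (f + 1) (x :: rest) cur acc
            = PySem.Chars.splitOn.go [c] f rest (x :: cur) acc := by
          simp [PySem.Chars.splitOn.go, List.isPrefixOf, hcx]
        rw [hstep, ih rest (x :: cur) acc (by simp at h; omega)]
        simp [pvSplit, hcx]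

lemma pv_splitOn_eq (c : Char) (cs : List Char) :
    PySem.Chars.splitOn cs [c] = pvSplit c cs [] := by
  have := pvSplit_go_spec c (cs.length + 1) cs [] [] (by omega)
  simpa [PySem.Chars.splitOn] using this

lemma pvSplit_not_mem (c : Char) :
    ∀ (l cur : List Char) (p : List Char), c ∉ cur → p ∈ pvSplit c l cur → c ∉ p := by
  intro l
  induction l with
  | nil =>
    intro cur p hc hp
    simp [pvSplit] at hp
    subst hp; simpa using hc
  | cons x rest ih =>
    intro cur p hc hp
    by_cases hcx : c = x
    · subst hcx
      simp [pvSplit] at hp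
      rcases hp with hp | hp
      · subst hp; simpa using hc
      · exact ih [] p (by simp) hp
    · simp [pvSplit, hcx] at hp
      exact ih (x :: cur) p (by simp [List.mem_cons, hcx, hc]) hp

lemma pvSplit_length_le (c : Char) :
    ∀ (l cur : List Char) (p : List Char), p ∈ pvSplit c l cur → p.length ≤ cur.length + l.length := by
  intro l
  induction l with
  | nil =>
    intro cur p hp
    simp [pvSplit] at hp
    subst hp; simp
  | cons x rest ih =>
    intro cur p hp
    by_cases hcx : c = x
    · subst hcx
      simp [pvSplit] at hp
      rcases hp with hp | hp
      · subst hp; simp only [List.length_reverse, List.length_cons]; omega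
      · have := ih [] p hp; simp at this ⊢; omega
    · simp [pvSplit, hcx] at hp
      have := ih (x :: cur) p hp
      simp at this ⊢; omega

lemma pvSplit_of_not_mem (c : Char) :
    ∀ (l cur : List Char), c ∉ l → pvSplit c l cur = [cur.reverse ++ l] := by
  intro l
  induction l with
  | nil => intro cur _; simp [pvSplit]
  | cons x rest ih =>
    intro cur h
    rw [List.mem_cons, not_or] at h
    simp [pvSplit, h.1, ih (x :: cur) h.2]

-- strip facts
lemma pv_dropWhile_dropWhile (p : Char → Bool) (l : List Char) :
    List.dropWhile p (List.dropWhile p l) = List.dropWhile p l := by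
  induction l with
  | nil => simp
  | cons x t ih =>
    by_cases h : p x
    · simp [h, ih]
    · simp [h]

lemma pv_mem_strip {x : Char} {s : List Char} (h : x ∈ PySem.Chars.strip s) : x ∈ s := by
  unfold PySem.Chars.strip PySem.Chars.rstrip PySem.Chars.lstrip at h
  rw [List.mem_reverse] at h
  have h1 : x ∈ (List.dropWhile PySem.Chars.isspace s).reverse :=
    (List.dropWhile_sublist _).subset h
  rw [List.mem_reverse] at h1
  exact (List.dropWhile_sublist _).subset h1

lemma pv_strip_length_le (s : List Char) : (PySem.Chars.strip s).length ≤ s.length := by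
  unfold PySem.Chars.strip PySem.Chars.rstrip PySem.Chars.lstrip
  have h1 := (List.dropWhile_sublist (l := (List.dropWhile PySem.Chars.isspace s).reverse)
    PySem.Chars.isspace).length_le
  have h2 := (List.dropWhile_sublist (l := s) PySem.Chars.isspace).length_le
  simp only [List.length_reverse] at *
  omega

lemma pv_rstrip_idem (x : List Char) :
    PySem.Chars.rstrip (PySem.Chars.rstrip x) = PySem.Chars.rstrip x := by
  unfold PySem.Chars.rstrip
  simp [pv_dropWhile_dropWhile]

lemma pv_lstrip_fix_rstrip (x : List Char) (h : PySem.Chars.lstrip x = x) :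
    PySem.Chars.lstrip (PySem.Chars.rstrip x) = PySem.Chars.rstrip x := by
  have hpre : PySem.Chars.rstrip x <+: x := by
    unfold PySem.Chars.rstrip
    have hsuf := List.dropWhile_suffix (l := x.reverse) PySem.Chars.isspace
    have hp := List.reverse_prefix.mpr hsuf
    simpa using hp
  cases hr : PySem.Chars.rstrip x with
  | nil => simp [PySem.Chars.lstrip]
  | cons a t =>
    rw [hr] at hpre
    obtain ⟨r, hx⟩ := hpre
    unfold PySem.Chars.lstrip at h ⊢
    have ha : PySem.Chars.isspace a = false := by
      by_contra hpa
      rw [Bool.not_eq_false] at hpa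
      rw [← hx, List.cons_append, List.dropWhile_cons_of_pos hpa] at h
      have hlen := congrArg List.length h
      have hle := (List.dropWhile_sublist (l := t ++ r) PySem.Chars.isspace).length_le
      simp [List.length_append] at hlen hle
      omega
    simp [ha]

lemma pv_strip_idem (s : List Char) :
    PySem.Chars.strip (PySem.Chars.strip s) = PySem.Chars.strip s := by
  have hfixl : PySem.Chars.lstrip (PySem.Chars.lstrip s) = PySem.Chars.lstrip s :=
    pv_dropWhile_dropWhile PySem.Chars.isspace s
  show PySem.Chars.rstrip (PySem.Chars.lstrip (PySem.Chars.rstrip (PySem.Chars.lstrip s)))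
      = PySem.Chars.rstrip (PySem.Chars.lstrip s)
  rw [pv_lstrip_fix_rstrip (PySem.Chars.lstrip s) hfixl, pv_rstrip_idem]

-- token-shape facts
lemma pv_mapCond_length {tok : List Char} (h : pvMapCond tok = true) : 5 ≤ tok.length := by
  unfold pvMapCond at h
  rw [Bool.and_eq_true] at h
  obtain ⟨h1, h2⟩ := h
  rw [PySem.Chars.startswith_iff] at h1
  rw [PySem.Chars.endswith_iff] at h2
  have h4 : 4 ≤ tok.length := h1.length_le
  by_contra hlt
  have hlen : tok.length = 4 := by omega
  have heq := h1.eq_of_length (by simp [hlen])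
  rw [← heq] at h2
  have hmem : ('>' : Char) ∈ (['m', 'a', 'p', '<'] : List Char) := h2.subset (by simp)
  simp at hmem

lemma pv_inner_length {tok : List Char} (h : pvMapCond tok = true) :
    (pvInner tok).length ≤ tok.length - 5 := by
  have h5 := pv_mapCond_length h
  unfold pvInner
  have hs := pv_strip_length_le (PySem.Chars.slice tok (some 4) (some (-1)))
  have hsl : (PySem.Chars.slice tok (some 4) (some (-1))).length = tok.length - 5 := by
    rw [PySem.Chars.slice_eq_listSlice, PySem.List.length_slice,
      PySem.List.clampIdx_neg_one, PySem.List.clampIdx_of_nonneg_of_le (by omega) (by exact_mod_cast by omega)]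
    omega
  omega

lemma pv_mem_inner {x : Char} {tok : List Char} (h : x ∈ pvInner tok) : x ∈ tok := by
  unfold pvInner at h
  have h1 := pv_mem_strip h
  rw [PySem.Chars.slice_eq_listSlice] at h1
  exact PySem.List.mem_of_mem_slice _ _ _ h1

lemma pv_stripBrack_length_le (tok : List Char) : (pvStripBrack tok).length ≤ tok.length := by
  unfold pvStripBrack
  split_ifs with h
  · have h1 := pv_strip_length_le (PySem.Chars.slice tok none (some (-2)))
    have h2 : (PySem.Chars.slice tok none (some (-2))).length ≤ tok.length := by
      rw [PySem.Chars.slice_eq_listSlice, PySem.List.slice_to_neg_ofNat tok 2 (by omega)]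
      simpa using (List.take_sublist _ _).length_le
    omega
  · exact le_refl _

lemma pv_mem_stripBrack {x : Char} {tok : List Char} (h : x ∈ pvStripBrack tok) : x ∈ tok := by
  unfold pvStripBrack at h
  split_ifs at h with hb
  · have h1 := pv_mem_strip h
    rw [PySem.Chars.slice_eq_listSlice] at h1
    exact PySem.List.mem_of_mem_slice _ _ _ h1
  · exact h

-- B's loop is fuel-independent once the fuel exceeds the token length
lemma pvUnwrapB_fuel :
    ∀ (f1 f2 : Nat) (tok : List Char), tok.length < f1 → tok.length < f2 →
      pvUnwrapB f1 tok = pvUnwrapB f2 tok := by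
  intro f1
  induction f1 with
  | zero => intro f2 tok h1 _; omega
  | succ f ih =>
    intro f2 tok h1 h2
    cases f2 with
    | zero => omega
    | succ g =>
      by_cases hm : pvMapCond (pvStripBrack tok)
      · rw [pvUnwrapB.eq_2, pvUnwrapB.eq_2, if_pos hm, if_pos hm]
        have hb := pv_stripBrack_length_le tok
        have h5 := pv_mapCond_length hm
        have hi := pv_inner_length hm
        exact ih g (pvInner (pvStripBrack tok)) (by omega) (by omega)
      · rw [pvUnwrapB.eq_2, pvUnwrapB.eq_2, if_neg hm, if_neg hm]

-- the char-level main equivalence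
set_option maxHeartbeats 1000000 in
lemma pv_main : ∀ (f : Nat) (cs : List Char), cs.length < f →
    pvGoA f cs = (PySem.Chars.splitOn cs ['|']).foldl pvBodyB [] := by
  intro f
  induction f with
  | zero => intro cs h; omega
  | succ f ih =>
    intro cs h
    have hsplit : (PySem.Chars.split? cs ['|']).getD [] = PySem.Chars.splitOn cs ['|'] := rfl
    rw [pvGoA.eq_2, hsplit]
    apply PySem.List.foldl_congr_mem
    intro out part hmem
    dsimp only
    have hnm : ('|' : Char) ∉ part := by
      rw [pv_splitOn_eq] at hmem
      exact pvSplit_not_mem '|' cs [] part (by simp) hmem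
    have hlen : part.length ≤ cs.length := by
      rw [pv_splitOn_eq] at hmem
      have := pvSplit_length_le '|' cs [] part hmem
      simpa using this
    by_cases hm : pvMapCond (pvStripBrack (PySem.Chars.strip part))
    · have hbl := pv_stripBrack_length_le (PySem.Chars.strip part)
      have hsl := pv_strip_length_le part
      have h5 := pv_mapCond_length hm
      have hil := pv_inner_length hm
      have hrec := ih (pvInner (pvStripBrack (PySem.Chars.strip part))) (by omega)
      have hnmi : ('|' : Char) ∉ pvInner (pvStripBrack (PySem.Chars.strip part)) :=
        fun hx => hnm (pv_mem_strip (pv_mem_stripBrack (pv_mem_inner hx)))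
      have hone : PySem.Chars.splitOn (pvInner (pvStripBrack (PySem.Chars.strip part))) ['|']
          = [pvInner (pvStripBrack (PySem.Chars.strip part))] := by
        rw [pv_splitOn_eq, pvSplit_of_not_mem '|' _ _ hnmi]; simp
      have hstripinner : PySem.Chars.strip (pvInner (pvStripBrack (PySem.Chars.strip part)))
          = pvInner (pvStripBrack (PySem.Chars.strip part)) := by
        unfold pvInner
        exact pv_strip_idem _
      have hstep : pvUnwrapB (part.length + 1) (PySem.Chars.strip part)
          = pvUnwrapB part.length (pvInner (pvStripBrack (PySem.Chars.strip part))) := by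
        rw [pvUnwrapB.eq_2, if_pos hm]
      have hunw : pvUnwrapB (part.length + 1) (PySem.Chars.strip part)
          = pvUnwrapB ((pvInner (pvStripBrack (PySem.Chars.strip part))).length + 1)
              (pvInner (pvStripBrack (PySem.Chars.strip part))) :=
        hstep.trans (pvUnwrapB_fuel part.length _ _ (by omega) (by omega))
      rw [if_pos hm, hrec, hone]
      simp only [List.foldl_cons, List.foldl_nil, pvBodyB, hstripinner, hunw]
      by_cases he : (pvUnwrapB ((pvInner (pvStripBrack (PySem.Chars.strip part))).length + 1)
          (pvInner (pvStripBrack (PySem.Chars.strip part)))).isEmpty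
      · simp [he]
      · simp [he]
    · rw [if_neg hm]
      have hu : pvUnwrapB (part.length + 1) (PySem.Chars.strip part)
          = pvStripBrack (PySem.Chars.strip part) := by
        rw [pvUnwrapB.eq_2, if_neg hm]
      simp only [pvBodyB, hu]

-- ===== VERDICT (by name: the statement is the Claim_ definition above) =====
theorem split_union_spec : Claim_equal_split_union := by
  intro t _
  unfold Spec_split_union split_union split_union_alt
  rw [pv_main (t.toList.length + 1) t.toList (by omega)]
  rfl
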